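-- pv_equiv track=rewrite | github.com/Leon2004e/V1_Quant_Firm | Quant_Structure/FTMO/Data_Center/Data_Operations/Strategy_Profiler/Strategy_Profile.py | detect_signal_family
-- ===== SOURCE A (Python) =====
-- def detect_signal_family(inputs: dict):
--     families = []
--
--     if any(k in inputs for k in ["EMAPeriod1"]):
--         families.append("EMA")
--
--     if any(k in inputs for k in [
--         "MACDFast1", "MACDSlow1", "MACDSmooth1",
--         "MACDMainFast1", "MACDMainSlow1", "MACDMainSmooth1",
--         "MACDMainCrossZroFst1", "MACDMainCrossZroSlw1", "MACDMainCrossZroSmt1"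
--     ]):
--         families.append("MACD")
--
--     if any(k in inputs for k in ["ADXLowerPeriod1", "ADXHigherPeriod1"]):
--         families.append("ADX")
--
--     if any(k in inputs for k in ["BollingerBandsPrd1"]):
--         families.append("BB")
--
--     if any(k in inputs for k in [
--         "OSMAChangesFastEMA1", "OSMAChangesSlowEMA1", "OSMAChangesSgnPrd1",
--         "OSMAChangesFastEMA2", "OSMAChangesSlowEMA2", "OSMAChangesSgnPrd2",
--         "OSMAChangesSgnPrd3"
--     ]):
--         families.append("OSMA")
--
--     if any(k in inputs for k in ["MTATRPeriod1", "MTATRPeriod2"]):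
--         families.append("ATR")
--
--     if any(k in inputs for k in ["WoodiesZLRPeriod1"]):
--         families.append("WZLR")
--
--     return families
-- ===== SOURCE B (Python) =====
-- # Inverted index: map each trigger key to its family, scan the inputs once,
-- # then emit the canonical family order filtered by what was found.
-- _ORDER = ("EMA", "MACD", "ADX", "BB", "OSMA", "ATR", "WZLR")
--
-- _KEY2FAM = {
--     "EMAPeriod1": "EMA",
--     "MACDFast1": "MACD", "MACDSlow1": "MACD", "MACDSmooth1": "MACD",
--     "MACDMainFast1": "MACD", "MACDMainSlow1": "MACD", "MACDMainSmooth1": "MACD",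
--     "MACDMainCrossZroFst1": "MACD", "MACDMainCrossZroSlw1": "MACD",
--     "MACDMainCrossZroSmt1": "MACD",
--     "ADXLowerPeriod1": "ADX", "ADXHigherPeriod1": "ADX",
--     "BollingerBandsPrd1": "BB",
--     "OSMAChangesFastEMA1": "OSMA", "OSMAChangesSlowEMA1": "OSMA",
--     "OSMAChangesSgnPrd1": "OSMA", "OSMAChangesFastEMA2": "OSMA",
--     "OSMAChangesSlowEMA2": "OSMA", "OSMAChangesSgnPrd2": "OSMA",
--     "OSMAChangesSgnPrd3": "OSMA",
--     "MTATRPeriod1": "ATR", "MTATRPeriod2": "ATR",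
--     "WoodiesZLRPeriod1": "WZLR",
-- }
--
--
-- def detect_signal_family(inputs: dict):
--     found = set()
--     for k in inputs:
--         fam = _KEY2FAM.get(k)
--         if fam is not None:
--             found.add(fam)
--     return [f for f in _ORDER if f in found]
-- ===== Notes on version B (the rewrite author's own statement) =====
-- stated objective: alternative
-- what changed: Inverted the lookup direction: instead of scanning the 23 trigger keys against the dict per family, B builds a key->family reverse index once, makes a single pass over the input keys collecting the set of families found, and emits the canonical family order filtered by that set.
import Mathlib
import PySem

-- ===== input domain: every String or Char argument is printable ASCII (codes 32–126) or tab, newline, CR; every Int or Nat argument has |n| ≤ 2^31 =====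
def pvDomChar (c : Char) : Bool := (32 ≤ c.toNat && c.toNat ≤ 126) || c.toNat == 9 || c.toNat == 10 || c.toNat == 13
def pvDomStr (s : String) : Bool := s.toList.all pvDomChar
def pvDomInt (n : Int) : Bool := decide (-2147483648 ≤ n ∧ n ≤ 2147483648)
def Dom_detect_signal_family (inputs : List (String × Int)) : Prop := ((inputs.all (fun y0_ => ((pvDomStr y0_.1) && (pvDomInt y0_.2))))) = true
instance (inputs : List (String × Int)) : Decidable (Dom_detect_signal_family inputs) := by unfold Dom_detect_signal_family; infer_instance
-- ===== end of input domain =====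

-- B inverts A's lookup: a key→family index is probed once per INPUT key (one pass, collecting a
-- set of families), instead of probing the inputs dict once per trigger key (objective: alternative).


-- ===== PORT A =====
-- 'k in inputs' on a dict: some pair's key equals k
def pvIn (inputs : List (String × Int)) (k : String) : Bool :=
  inputs.any (fun p => p.1 == k)

-- literal transliteration of A: seven if/append branches in order
def detect_signal_family (inputs : List (String × Int)) : List String :=
  let families : List String := []
  let families := if (["EMAPeriod1"].any (fun k => pvIn inputs k)) then families ++ ["EMA"] else families
  let families := if (["MACDFast1", "MACDSlow1", "MACDSmooth1",
        "MACDMainFast1", "MACDMainSlow1", "MACDMainSmooth1",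
        "MACDMainCrossZroFst1", "MACDMainCrossZroSlw1", "MACDMainCrossZroSmt1"].any (fun k => pvIn inputs k)) then families ++ ["MACD"] else families
  let families := if (["ADXLowerPeriod1", "ADXHigherPeriod1"].any (fun k => pvIn inputs k)) then families ++ ["ADX"] else families
  let families := if (["BollingerBandsPrd1"].any (fun k => pvIn inputs k)) then families ++ ["BB"] else families
  let families := if (["OSMAChangesFastEMA1", "OSMAChangesSlowEMA1", "OSMAChangesSgnPrd1",
        "OSMAChangesFastEMA2", "OSMAChangesSlowEMA2", "OSMAChangesSgnPrd2",
        "OSMAChangesSgnPrd3"].any (fun k => pvIn inputs k)) then families ++ ["OSMA"] else families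
  let families := if (["MTATRPeriod1", "MTATRPeriod2"].any (fun k => pvIn inputs k)) then families ++ ["ATR"] else families
  let families := if (["WoodiesZLRPeriod1"].any (fun k => pvIn inputs k)) then families ++ ["WZLR"] else families
  families

-- ===== PORT B =====
-- B's canonical output order
def pvOrder : List String := ["EMA", "MACD", "ADX", "BB", "OSMA", "ATR", "WZLR"]

-- B's reverse index: trigger key ↦ family name (the module-level _KEY2FAM dict)
def pvKey2Fam : PySem.Dict String String := PySem.Dict.ofList
  [("EMAPeriod1", "EMA"),
   ("MACDFast1", "MACD"), ("MACDSlow1", "MACD"), ("MACDSmooth1", "MACD"),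
   ("MACDMainFast1", "MACD"), ("MACDMainSlow1", "MACD"), ("MACDMainSmooth1", "MACD"),
   ("MACDMainCrossZroFst1", "MACD"), ("MACDMainCrossZroSlw1", "MACD"),
   ("MACDMainCrossZroSmt1", "MACD"),
   ("ADXLowerPeriod1", "ADX"), ("ADXHigherPeriod1", "ADX"),
   ("BollingerBandsPrd1", "BB"),
   ("OSMAChangesFastEMA1", "OSMA"), ("OSMAChangesSlowEMA1", "OSMA"),
   ("OSMAChangesSgnPrd1", "OSMA"), ("OSMAChangesFastEMA2", "OSMA"),
   ("OSMAChangesSlowEMA2", "OSMA"), ("OSMAChangesSgnPrd2", "OSMA"),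
   ("OSMAChangesSgnPrd3", "OSMA"),
   ("MTATRPeriod1", "ATR"), ("MTATRPeriod2", "ATR"),
   ("WoodiesZLRPeriod1", "WZLR")]

-- B's loop: one pass over the input keys, collecting the families found into a set
def pvScan (inputs : List (String × Int)) : PySem.Set String :=
  inputs.foldl (fun s p =>
    match PySem.Dict.get? pvKey2Fam p.1 with
    | some fam => PySem.Set.add s fam
    | none => s) PySem.Set.empty

-- transliteration of B: scan the inputs once, then filter the canonical order by the set found
def detect_signal_family_alt (inputs : List (String × Int)) : List String :=
  let found := pvScan inputs
  pvOrder.filter (fun f => PySem.Set.contains found f)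

-- ===== PRECONDITION & SPEC =====
def Spec_detect_signal_family (inputs : List (String × Int)) (out : List String) : Prop := out = detect_signal_family_alt inputs
instance (inputs : List (String × Int)) (out : List String) : Decidable (Spec_detect_signal_family inputs out) := by unfold Spec_detect_signal_family; infer_instance

-- ===== CLAIM (what is proved, stated in full; the proofs are below) =====
def Claim_equal_detect_signal_family : Prop := ∀ (inputs : List (String × Int)), Dom_detect_signal_family inputs → Spec_detect_signal_family inputs (detect_signal_family inputs)

-- ===== LEMMAS AND PROOFS =====

-- the reverse index as a literal Dict (keys are pairwise distinct, so ofList inserts in order)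
theorem pvKey2Fam_mk : pvKey2Fam = PySem.Dict.mk
  [("EMAPeriod1", "EMA"),
   ("MACDFast1", "MACD"), ("MACDSlow1", "MACD"), ("MACDSmooth1", "MACD"),
   ("MACDMainFast1", "MACD"), ("MACDMainSlow1", "MACD"), ("MACDMainSmooth1", "MACD"),
   ("MACDMainCrossZroFst1", "MACD"), ("MACDMainCrossZroSlw1", "MACD"),
   ("MACDMainCrossZroSmt1", "MACD"),
   ("ADXLowerPeriod1", "ADX"), ("ADXHigherPeriod1", "ADX"),
   ("BollingerBandsPrd1", "BB"),
   ("OSMAChangesFastEMA1", "OSMA"), ("OSMAChangesSlowEMA1", "OSMA"),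
   ("OSMAChangesSgnPrd1", "OSMA"), ("OSMAChangesFastEMA2", "OSMA"),
   ("OSMAChangesSlowEMA2", "OSMA"), ("OSMAChangesSgnPrd2", "OSMA"),
   ("OSMAChangesSgnPrd3", "OSMA"),
   ("MTATRPeriod1", "ATR"), ("MTATRPeriod2", "ATR"),
   ("WoodiesZLRPeriod1", "WZLR")] := by decide

-- membership in the set built by B's scan

-- the 23 trigger keys of the reverse index, in order
def pvAllKeys : List String := ["EMAPeriod1", "MACDFast1", "MACDSlow1", "MACDSmooth1", "MACDMainFast1", "MACDMainSlow1", "MACDMainSmooth1", "MACDMainCrossZroFst1", "MACDMainCrossZroSlw1", "MACDMainCrossZroSmt1", "ADXLowerPeriod1", "ADXHigherPeriod1", "BollingerBandsPrd1", "OSMAChangesFastEMA1", "OSMAChangesSlowEMA1", "OSMAChangesSgnPrd1", "OSMAChangesFastEMA2", "OSMAChangesSlowEMA2", "OSMAChangesSgnPrd2", "OSMAChangesSgnPrd3", "MTATRPeriod1", "MTATRPeriod2", "WoodiesZLRPeriod1"]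

-- membership in the set built by B's scan
theorem mem_pvScan (inputs : List (String × Int)) (f : String) :
    f ∈ pvScan inputs ↔ ∃ p ∈ inputs, PySem.Dict.get? pvKey2Fam p.1 = some f := by
  unfold pvScan
  suffices h : ∀ (l : List (String × Int)) (s : PySem.Set String),
      f ∈ l.foldl (fun s p =>
        match PySem.Dict.get? pvKey2Fam p.1 with
        | some fam => PySem.Set.add s fam
        | none => s) s ↔ f ∈ s ∨ ∃ p ∈ l, PySem.Dict.get? pvKey2Fam p.1 = some f by
    rw [h inputs PySem.Set.empty]
    simp [PySem.Set.empty]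
  intro l
  induction l with
  | nil => simp
  | cons p l ih =>
    intro s
    cases h : PySem.Dict.get? pvKey2Fam p.1 with
    | none =>
      simp only [List.foldl_cons, h, ih, List.mem_cons]
      aesop
    | some fam =>
      simp only [List.foldl_cons, h, ih, PySem.Set.mem_add, List.mem_cons]
      aesop

-- which keys the reverse index maps to each family
set_option maxHeartbeats 1000000 in
theorem lookup_eq (k : String) (f : String) :
    PySem.Dict.get? pvKey2Fam k = some f ↔
      (k ∈ (pvAllKeys.take 1) ∧ f = "EMA") ∨
      (k ∈ ((pvAllKeys.drop 1).take 9) ∧ f = "MACD") ∨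
      (k ∈ ((pvAllKeys.drop 10).take 2) ∧ f = "ADX") ∨
      (k ∈ ((pvAllKeys.drop 12).take 1) ∧ f = "BB") ∨
      (k ∈ ((pvAllKeys.drop 13).take 7) ∧ f = "OSMA") ∨
      (k ∈ ((pvAllKeys.drop 20).take 2) ∧ f = "ATR") ∨
      (k ∈ ((pvAllKeys.drop 22).take 1) ∧ f = "WZLR") := by
  by_cases hk : k ∈ pvAllKeys
  · simp only [pvAllKeys, List.mem_cons, List.not_mem_nil, or_false] at hk
    rcases hk with rfl|rfl|rfl|rfl|rfl|rfl|rfl|rfl|rfl|rfl|rfl|rfl|rfl|rfl|rfl|rfl|rfl|rfl|rfl|rfl|rfl|rfl|rfl <;>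
      simp [pvKey2Fam_mk, pvAllKeys, PySem.Dict.get?_mk_cons, eq_comm]
  · have h0 : PySem.Dict.get? pvKey2Fam k = none := by
      rw [PySem.Dict.get?_eq_none_iff_not_mem_keys]
      simpa [pvKey2Fam_mk, pvAllKeys] using hk
    rw [h0]
    simp only [pvAllKeys, List.mem_cons, List.not_mem_nil, List.take, List.drop,
      or_false] at hk ⊢
    tauto

-- B's per-family membership test equals A's per-family any() scan
theorem contains_pvScan (inputs : List (String × Int)) (f : String) (ks : List String)
    (hk : ∀ k, PySem.Dict.get? pvKey2Fam k = some f ↔ k ∈ ks) :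
    PySem.Set.contains (pvScan inputs) f = ks.any (fun k => pvIn inputs k) := by
  rw [Bool.eq_iff_iff]
  simp only [PySem.Set.contains_iff, mem_pvScan, hk, List.any_eq_true, pvIn, beq_iff_eq]
  aesop

-- ===== VERDICT (by name: the statement is the Claim_ definition above) =====
theorem detect_signal_family_spec : Claim_equal_detect_signal_family := by
  intro inputs _
  show detect_signal_family inputs = detect_signal_family_alt inputs
  have hEMA := contains_pvScan inputs "EMA" ["EMAPeriod1"]
    (by intro k; rw [lookup_eq]; simp [pvAllKeys])
  have hMACD := contains_pvScan inputs "MACD" ["MACDFast1", "MACDSlow1", "MACDSmooth1",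
        "MACDMainFast1", "MACDMainSlow1", "MACDMainSmooth1",
        "MACDMainCrossZroFst1", "MACDMainCrossZroSlw1", "MACDMainCrossZroSmt1"]
    (by intro k; rw [lookup_eq]; simp [pvAllKeys])
  have hADX := contains_pvScan inputs "ADX" ["ADXLowerPeriod1", "ADXHigherPeriod1"]
    (by intro k; rw [lookup_eq]; simp [pvAllKeys])
  have hBB := contains_pvScan inputs "BB" ["BollingerBandsPrd1"]
    (by intro k; rw [lookup_eq]; simp [pvAllKeys])
  have hOSMA := contains_pvScan inputs "OSMA" ["OSMAChangesFastEMA1", "OSMAChangesSlowEMA1",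
        "OSMAChangesSgnPrd1", "OSMAChangesFastEMA2", "OSMAChangesSlowEMA2",
        "OSMAChangesSgnPrd2", "OSMAChangesSgnPrd3"]
    (by intro k; rw [lookup_eq]; simp [pvAllKeys])
  have hATR := contains_pvScan inputs "ATR" ["MTATRPeriod1", "MTATRPeriod2"]
    (by intro k; rw [lookup_eq]; simp [pvAllKeys])
  have hWZLR := contains_pvScan inputs "WZLR" ["WoodiesZLRPeriod1"]
    (by intro k; rw [lookup_eq]; simp [pvAllKeys])
  simp only [detect_signal_family, detect_signal_family_alt, pvOrder, List.filter_cons,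
    List.filter_nil, hEMA, hMACD, hADX, hBB, hOSMA, hATR, hWZLR]
  generalize (["EMAPeriod1"].any fun k => pvIn inputs k) = b1
  generalize (["MACDFast1", "MACDSlow1", "MACDSmooth1",
        "MACDMainFast1", "MACDMainSlow1", "MACDMainSmooth1",
        "MACDMainCrossZroFst1", "MACDMainCrossZroSlw1", "MACDMainCrossZroSmt1"].any
      fun k => pvIn inputs k) = b2
  generalize (["ADXLowerPeriod1", "ADXHigherPeriod1"].any fun k => pvIn inputs k) = b3
  generalize (["BollingerBandsPrd1"].any fun k => pvIn inputs k) = b4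
  generalize (["OSMAChangesFastEMA1", "OSMAChangesSlowEMA1", "OSMAChangesSgnPrd1",
        "OSMAChangesFastEMA2", "OSMAChangesSlowEMA2", "OSMAChangesSgnPrd2",
        "OSMAChangesSgnPrd3"].any fun k => pvIn inputs k) = b5
  generalize (["MTATRPeriod1", "MTATRPeriod2"].any fun k => pvIn inputs k) = b6
  generalize (["WoodiesZLRPeriod1"].any fun k => pvIn inputs k) = b7
  cases b1 <;> cases b2 <;> cases b3 <;> cases b4 <;> cases b5 <;> cases b6 <;> cases b7 <;> rfl
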